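-- pv_equiv track=rewrite | github.com/xfbs/euler | src/python/011/solver.py | max_product
-- ===== SOURCE A (Python) =====
-- def max_product(grid, direction, length):
--    dx, dy = direction
--    maxp = 0
--
--    for x in range(0, len(grid)):
--       for y in range(0, len(grid[x])):
--          product = 1
--          for c in range(0, length):
--             cur_x = x + c * dx
--             cur_y = y + c * dy
--
--             if cur_x >= 0 and cur_x < len(grid):
--                if cur_y >= 0 and cur_y < len(grid[cur_x]):
--                   product *= grid[cur_x][cur_y]
--                else:
--                   product = 0
--             else:
--                product = 0
--          if product > maxp:
--             maxp = product
--
--    return maxp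
-- ===== SOURCE B (Python) =====
-- # Wavefront table: one pass per window offset c updating a whole table of
-- # partial products, instead of A's per-cell inner loop over c.
-- def cell(grid, x, y):
--     # value at (x, y), or 0 when the position is outside the (possibly ragged) grid
--     if 0 <= x < len(grid) and 0 <= y < len(grid[x]):
--         return grid[x][y]
--     return 0
--
-- def max_product(grid, direction, length):
--     dx, dy = direction
--     table = [[1] * len(row) for row in grid]
--     for c in range(length):
--         ox, oy = c * dx, c * dy
--         for x in range(len(table)):
--             row = table[x]
--             for y in range(len(row)):
--                 row[y] *= cell(grid, x + ox, y + oy)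
--     return max([0] + [p for row in table for p in row])
-- ===== Notes on version B (the rewrite author's own statement) =====
-- stated objective: alternative
-- what changed: Replaces A's per-cell innermost loop over window offsets by a wavefront scheme: a whole table of partial window products is updated once per offset c (out-of-bounds steps multiply by 0), and the answer is the max of the final table and 0.
import Mathlib
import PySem

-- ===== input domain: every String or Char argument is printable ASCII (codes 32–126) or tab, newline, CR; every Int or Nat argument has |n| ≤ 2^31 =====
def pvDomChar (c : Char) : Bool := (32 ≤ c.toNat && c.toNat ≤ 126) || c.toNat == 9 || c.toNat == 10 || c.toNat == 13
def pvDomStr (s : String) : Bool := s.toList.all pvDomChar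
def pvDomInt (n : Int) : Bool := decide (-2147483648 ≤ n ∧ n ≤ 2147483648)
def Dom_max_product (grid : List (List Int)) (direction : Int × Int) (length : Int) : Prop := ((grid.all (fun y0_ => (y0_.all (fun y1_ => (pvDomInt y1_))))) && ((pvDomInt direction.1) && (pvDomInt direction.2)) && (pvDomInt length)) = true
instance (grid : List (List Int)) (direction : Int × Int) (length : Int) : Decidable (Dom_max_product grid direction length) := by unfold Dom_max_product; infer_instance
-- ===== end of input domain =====

-- B replaces A's per-cell inner loop by a wavefront pass: a table of partial window
-- products updated once per window offset c; same O(N*M*length) cost (objective: alternative).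

-- ===== PORT A =====
def max_product (grid : List (List Int)) (direction : Int × Int) (length : Int) : Int :=
  let dx := direction.1
  let dy := direction.2
  (PySem.List.pyRange 0 (grid.length : Int) 1).foldl (fun maxp x =>
    (PySem.List.pyRange 0 ((PySem.List.pyGetD grid x []).length : Int) 1).foldl (fun maxp y =>
      let product := (PySem.List.pyRange 0 length 1).foldl (fun product c =>
        let cur_x := x + c * dx
        let cur_y := y + c * dy
        if cur_x ≥ 0 ∧ cur_x < (grid.length : Int) then
          if cur_y ≥ 0 ∧ cur_y < ((PySem.List.pyGetD grid cur_x []).length : Int) then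
            product * PySem.List.pyGetD (PySem.List.pyGetD grid cur_x []) cur_y 0
          else 0
        else 0) 1
      if product > maxp then product else maxp) maxp) 0

-- ===== PORT B =====
-- value at (x, y), or 0 when the position is outside the (possibly ragged) grid
def pvCell (grid : List (List Int)) (x y : Int) : Int :=
  if 0 ≤ x ∧ x < (grid.length : Int) then
    if 0 ≤ y ∧ y < ((PySem.List.pyGetD grid x []).length : Int) then
      PySem.List.pyGetD (PySem.List.pyGetD grid x []) y 0
    else 0
  else 0

-- inner 'for y in range(len(row)): row[y] *= cell(...)' as structural recursion on the row
def pvStepRow (grid : List (List Int)) (ox oy x y : Int) : List Int → List Int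
  | [] => []
  | p :: ps => p * pvCell grid (x + ox) (y + oy) :: pvStepRow grid ox oy x (y + 1) ps

-- 'for x in range(len(table)): …' as structural recursion on the table
def pvStep (grid : List (List Int)) (ox oy x : Int) : List (List Int) → List (List Int)
  | [] => []
  | r :: rs => pvStepRow grid ox oy x 0 r :: pvStep grid ox oy (x + 1) rs

def max_product_alt (grid : List (List Int)) (direction : Int × Int) (length : Int) : Int :=
  let dx := direction.1
  let dy := direction.2
  let table0 : List (List Int) := grid.map (fun row => row.map (fun _ => (1 : Int)))
  let table := (PySem.List.pyRange 0 length 1).foldl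
    (fun t c => pvStep grid (c * dx) (c * dy) 0 t) table0
  -- max([0] + [p for row in table for p in row]); the list is nonempty, so getD's default is unreachable
  (PySem.List.max? ((0 : Int) :: table.flatMap id) (fun v => v)).getD 0

-- ===== PRECONDITION & SPEC =====
def Spec_max_product (grid : List (List Int)) (direction : Int × Int) (length : Int) (out : Int) : Prop := out = max_product_alt grid direction length
instance (grid : List (List Int)) (direction : Int × Int) (length : Int) (out : Int) : Decidable (Spec_max_product grid direction length out) := by unfold Spec_max_product; infer_instance

-- ===== CLAIM (what is proved, stated in full; the proofs are below) =====
def Claim_equal_max_product : Prop := ∀ (grid : List (List Int)) (direction : Int × Int) (length : Int), Dom_max_product grid direction length → Spec_max_product grid direction length (max_product grid direction length)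

-- ===== LEMMAS AND PROOFS =====

-- per-cell window product: fold of c ↦ (· * cell) starting from p
def pvProd (grid : List (List Int)) (dx dy : Int) (cs : List Int) (x y p : Int) : Int :=
  cs.foldl (fun q c => q * pvCell grid (x + c * dx) (y + c * dy)) p

def pvTmapRow (grid : List (List Int)) (dx dy : Int) (cs : List Int) (x y : Int) : List Int → List Int
  | [] => []
  | p :: ps => pvProd grid dx dy cs x y p :: pvTmapRow grid dx dy cs x (y + 1) ps

def pvTmap (grid : List (List Int)) (dx dy : Int) (cs : List Int) (x : Int) : List (List Int) → List (List Int)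
  | [] => []
  | r :: rs => pvTmapRow grid dx dy cs x 0 r :: pvTmap grid dx dy cs (x + 1) rs

-- A's inner-loop body equals B's uniform multiply-by-cell body
lemma pv_body_eq (grid : List (List Int)) (dx dy x y p c : Int) :
    (if x + c * dx ≥ 0 ∧ x + c * dx < (grid.length : Int) then
       if y + c * dy ≥ 0 ∧ y + c * dy < ((PySem.List.pyGetD grid (x + c * dx) []).length : Int) then
         p * PySem.List.pyGetD (PySem.List.pyGetD grid (x + c * dx) []) (y + c * dy) 0
       else 0
     else 0)
    = p * pvCell grid (x + c * dx) (y + c * dy) := by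
  unfold pvCell
  split_ifs with h1 h2 <;> simp_all [ge_iff_le]

lemma pvProd_nil (grid : List (List Int)) (dx dy x y p : Int) :
    pvProd grid dx dy [] x y p = p := rfl

lemma pvTmapRow_nil_cs (grid : List (List Int)) (dx dy x : Int) :
    ∀ (y : Int) (row : List Int), pvTmapRow grid dx dy [] x y row = row := by
  intro y row
  induction row generalizing y with
  | nil => rfl
  | cons p ps ih => simp [pvTmapRow, pvProd_nil, ih]

lemma pvTmap_nil_cs (grid : List (List Int)) (dx dy : Int) :
    ∀ (x : Int) (T : List (List Int)), pvTmap grid dx dy [] x T = T := by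
  intro x T
  induction T generalizing x with
  | nil => rfl
  | cons r rs ih => simp [pvTmap, pvTmapRow_nil_cs, ih]

lemma pvTmapRow_step (grid : List (List Int)) (dx dy c : Int) (cs : List Int) (x : Int) :
    ∀ (y : Int) (row : List Int),
      pvTmapRow grid dx dy cs x y (pvStepRow grid (c * dx) (c * dy) x y row)
        = pvTmapRow grid dx dy (c :: cs) x y row := by
  intro y row
  induction row generalizing y with
  | nil => rfl
  | cons p ps ih => simp [pvStepRow, pvTmapRow, pvProd, List.foldl_cons, ih]

lemma pvTmap_step (grid : List (List Int)) (dx dy c : Int) (cs : List Int) :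
    ∀ (x : Int) (T : List (List Int)),
      pvTmap grid dx dy cs x (pvStep grid (c * dx) (c * dy) x T)
        = pvTmap grid dx dy (c :: cs) x T := by
  intro x T
  induction T generalizing x with
  | nil => rfl
  | cons r rs ih => simp [pvStep, pvTmap, pvTmapRow_step, ih]

lemma pv_fold_step (grid : List (List Int)) (dx dy : Int) :
    ∀ (cs : List Int) (T : List (List Int)),
      cs.foldl (fun t c => pvStep grid (c * dx) (c * dy) 0 t) T = pvTmap grid dx dy cs 0 T := by
  intro cs
  induction cs with
  | nil => intro T; simp [pvTmap_nil_cs]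
  | cons c cs ih => intro T; rw [List.foldl_cons, ih, pvTmap_step]

-- "if p > m then p else m" is max
lemma pv_if_max (m p : Int) : (if p > m then p else m) = max m p := by
  split_ifs <;> omega

-- A's inner c-loop computes pvProd
lemma pv_inner_eq (grid : List (List Int)) (dx dy : Int) (cs : List Int) (x y : Int) :
    cs.foldl (fun product c =>
      if x + c * dx ≥ 0 ∧ x + c * dx < (grid.length : Int) then
        if y + c * dy ≥ 0 ∧ y + c * dy < ((PySem.List.pyGetD grid (x + c * dx) []).length : Int) then
          product * PySem.List.pyGetD (PySem.List.pyGetD grid (x + c * dx) []) (y + c * dy) 0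
        else 0
      else 0) 1 = pvProd grid dx dy cs x y 1 := by
  unfold pvProd
  congr 1
  funext p c
  exact pv_body_eq grid dx dy x y p c

-- A's y-loop over one row equals a foldl max over the B row of window products
lemma pv_rowEq (grid : List (List Int)) (dx dy : Int) (cs : List Int) (x : Int) :
    ∀ (row : List Int) (y0 m : Int),
      (PySem.List.pyRange y0 (y0 + (row.length : Int)) 1).foldl
          (fun m y => max m (pvProd grid dx dy cs x y 1)) m
        = (pvTmapRow grid dx dy cs x y0 (row.map (fun _ => (1 : Int)))).foldl max m := by
  intro row
  induction row with
  | nil => intro y0 m; simp [PySem.List.pyRange_one_eq_nil, pvTmapRow]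
  | cons a row ih =>
    intro y0 m
    have hb2 : y0 + (((a :: row).length : Nat) : Int) = y0 + 1 + (row.length : Int) := by
      simp only [List.length_cons]; omega
    have h1 : (PySem.List.pyRange y0 (y0 + ((a :: row).length : Int)) 1)
        = y0 :: PySem.List.pyRange (y0 + 1) (y0 + 1 + (row.length : Int)) 1 := by
      rw [hb2, PySem.List.pyRange_one_cons (by omega)]
    rw [h1]
    simp only [List.foldl_cons, List.map_cons, pvTmapRow]
    rw [ih (y0 + 1) (max m (pvProd grid dx dy cs x y0 1))]

-- A's whole double loop equals foldl max over the flattened B table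
lemma pv_tableEq (grid : List (List Int)) (dx dy : Int) (cs : List Int) :
    ∀ (rows : List (List Int)) (x0 m : Int),
      (PySem.List.enumerate rows x0).foldl
          (fun m pr => (PySem.List.pyRange 0 ((pr.2.length : Int)) 1).foldl
            (fun m y => max m (pvProd grid dx dy cs pr.1 y 1)) m) m
        = ((pvTmap grid dx dy cs x0 (rows.map (fun r => r.map (fun _ => (1 : Int))))).flatMap id).foldl max m := by
  intro rows
  induction rows with
  | nil => intro x0 m; simp [PySem.List.enumerate, pvTmap]
  | cons r rs ih =>
    intro x0 m
    rw [PySem.List.enumerate_cons]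
    simp only [List.foldl_cons, List.map_cons, pvTmap, List.flatMap_cons, id_eq, List.foldl_append]
    rw [ih (x0 + 1)]
    congr 1
    have h0 : (0 : Int) + (r.length : Int) = (r.length : Int) := by ring
    rw [← h0]
    exact pv_rowEq grid dx dy cs x0 r 0 m

-- ===== VERDICT (by name: the statement is the Claim_ definition above) =====
theorem max_product_spec : Claim_equal_max_product := by
  intro grid direction length _
  unfold Spec_max_product max_product max_product_alt
  simp only []
  set dx := direction.1
  set dy := direction.2
  set cs := PySem.List.pyRange 0 length 1 with hcs
  -- B side
  rw [pv_fold_step grid dx dy cs]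
  rw [PySem.List.max?_id_cons]
  simp only [Option.getD_some]
  -- A side: rewrite the two loop bodies pointwise
  have hb : (fun (maxp x : Int) =>
      (PySem.List.pyRange 0 ((PySem.List.pyGetD grid x []).length : Int) 1).foldl (fun maxp y =>
        let product := cs.foldl (fun product c =>
          let cur_x := x + c * dx
          let cur_y := y + c * dy
          if cur_x ≥ 0 ∧ cur_x < (grid.length : Int) then
            if cur_y ≥ 0 ∧ cur_y < ((PySem.List.pyGetD grid cur_x []).length : Int) then
              product * PySem.List.pyGetD (PySem.List.pyGetD grid cur_x []) cur_y 0
            else 0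
          else 0) 1
        if product > maxp then product else maxp) maxp)
      = (fun (m x : Int) =>
      (PySem.List.pyRange 0 ((PySem.List.pyGetD grid x []).length : Int) 1).foldl
        (fun m y => max m (pvProd grid dx dy cs x y 1)) m) := by
    funext m x
    congr 1
    funext m y
    simp only [pv_inner_eq grid dx dy cs x y, pv_if_max]
  rw [hb]
  -- outer loop as a fold over enumerate
  have he : (PySem.List.pyRange 0 ((grid.length : Int)) 1).foldl
      (fun (m x : Int) => (PySem.List.pyRange 0 ((PySem.List.pyGetD grid x []).length : Int) 1).foldl
        (fun m y => max m (pvProd grid dx dy cs x y 1)) m) 0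
      = (PySem.List.enumerate grid 0).foldl
      (fun m pr => (PySem.List.pyRange 0 ((pr.2.length : Int)) 1).foldl
        (fun m y => max m (pvProd grid dx dy cs pr.1 y 1)) m) 0 := by
    rw [PySem.List.enumerate_eq_map_pyRange grid ([] : List Int), List.foldl_map]
    simp only [PySem.List.len_eq]
  rw [he]
  exact pv_tableEq grid dx dy cs grid 0 0
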